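-- pv_equiv track=rewrite | github.com/the-shivers/advent_of_code | 2023/day12/solution.py | generate_brute_force_list
-- ===== SOURCE A (Python) =====
-- import itertools
--
-- def generate_brute_force_list(string, int_list):
--     """given string full of ?s generates brute force solution list.
--     Okay, we need to think about this more. The total number of broken parts always
--     equals the sum of the elements of the broken segments list. Lets say its [1, 2, 2].
--     This is 5 broken parts. They must be distributed over the question mark slots. So
--     we get the indices of the question marks. And find combinations of those of
--     length sum(broken segments list).
--
--     Long story short:
--     its num_question_marks CHOOSE sum(int_list) combinations, not 2^num_question_marks!
--     """
--     brute_force_list = []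
--     question_indices = [i for i, ltr in enumerate(string) if ltr == '?']
--     combos = list(itertools.combinations(question_indices, sum(int_list) - string.count('#')))
--     for combo in combos:
--         str_list = list(string) # Need to make it mutable
--         for index in combo:
--             str_list[index] = '#'
--         brute_force_list.append(''.join(str_list).replace('?', '.')) # Replace remaining parts
--     return brute_force_list
-- ===== SOURCE B (Python) =====
-- def generate_brute_force_list(string, int_list):
--     """Recursive backtracking over the string with a remaining-'#' budget:
--     no itertools, prunes as soon as the budget is exhausted."""
--     budget = sum(int_list) - string.count('#')
--
--     def go(i, budget):
--         if i == len(string):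
--             return [''] if budget == 0 else []
--         c = string[i]
--         if c == '?':
--             res = ['#' + t for t in go(i + 1, budget - 1)] if budget > 0 else []
--             res += ['.' + t for t in go(i + 1, budget)]
--             return res
--         return [c + t for t in go(i + 1, budget)]
--
--     return go(0, budget)
-- ===== Notes on version B (the rewrite author's own statement) =====
-- stated objective: alternative
-- what changed: Replaces itertools.combinations over '?'-indices plus per-combo list mutation/replace with a single recursive backtracking pass over the string that carries a remaining-'#' budget and builds each result once, pruning when the budget is exhausted.
-- crash fix: When sum(int_list) - string.count('#') is negative, A raises ValueError (itertools.combinations with negative r); B returns []. — e.g. on generate_brute_force_list("#", [0]): A raises ValueError, B returns []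
import Mathlib
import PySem

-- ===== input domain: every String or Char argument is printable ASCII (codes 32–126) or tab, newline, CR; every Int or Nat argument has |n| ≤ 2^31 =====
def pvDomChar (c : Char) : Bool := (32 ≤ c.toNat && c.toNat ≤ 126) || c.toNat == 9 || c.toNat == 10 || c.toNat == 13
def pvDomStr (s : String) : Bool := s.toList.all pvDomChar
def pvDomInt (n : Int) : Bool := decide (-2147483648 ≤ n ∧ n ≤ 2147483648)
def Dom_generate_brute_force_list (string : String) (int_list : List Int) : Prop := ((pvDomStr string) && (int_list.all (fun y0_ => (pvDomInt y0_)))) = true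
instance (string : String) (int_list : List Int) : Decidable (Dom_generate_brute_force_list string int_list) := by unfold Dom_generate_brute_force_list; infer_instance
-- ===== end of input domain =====

-- B replaces the itertools.combinations enumeration of '?'-index subsets with a
-- recursive backtracking pass over the string carrying a remaining-'#' budget.


-- ===== PORT A =====
def generate_brute_force_list (string : String) (int_list : List Int) : List String :=
  let question_indices : List Int :=
    ((PySem.List.enumerate string.toList).filter (fun p => p.2 == '?')).map (fun p => p.1)
  -- itertools.combinations raises ValueError for a negative r (excluded by Pre_), so .toNat is only read on r ≥ 0
  let combos := PySem.List.combinations question_indices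
    (int_list.sum - (PySem.Str.count string "#" : Int)).toNat
  combos.foldl (fun brute_force_list combo =>
    brute_force_list ++
      [PySem.Str.replace
        (String.ofList (combo.foldl (fun str_list index => PySem.List.pySetD str_list index '#')
          string.toList)) "?" "."]) []

-- ===== PORT B =====
def gbfGo (cs : List Char) (budget : Int) : List (List Char) :=
  match cs with
  | [] => if budget = 0 then [[]] else []
  | c :: rest =>
    if c = '?' then
      (if budget > 0 then (gbfGo rest (budget - 1)).map (fun t => '#' :: t) else [])
        ++ (gbfGo rest budget).map (fun t => '.' :: t)
    else (gbfGo rest budget).map (fun t => c :: t)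

def generate_brute_force_list_alt (string : String) (int_list : List Int) : List String :=
  (gbfGo string.toList (int_list.sum - (PySem.Str.count string "#" : Int))).map String.ofList

-- ===== PRECONDITION & SPEC =====
-- Pre_ excludes exactly the inputs where sum(int_list) - string.count('#') is negative:
-- there itertools.combinations raises ValueError in A.
def Pre_generate_brute_force_list (string : String) (int_list : List Int) : Prop :=
  0 ≤ int_list.sum - (PySem.Str.count string "#" : Int)
instance (string : String) (int_list : List Int) : Decidable (Pre_generate_brute_force_list string int_list) := by unfold Pre_generate_brute_force_list; infer_instance

def pvWitness_generate_brute_force_list : String × List Int := ("?.?a", [1])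

-- When sum(int_list) - string.count('#') is negative, A raises ValueError (itertools.combinations with negative r); B returns [].
def Raises_generate_brute_force_list (string : String) (int_list : List Int) : Prop :=
  int_list.sum - (PySem.Str.count string "#" : Int) < 0
instance (string : String) (int_list : List Int) : Decidable (Raises_generate_brute_force_list string int_list) := by unfold Raises_generate_brute_force_list; infer_instance
def pvRaiseWitness_generate_brute_force_list : String × List Int := ("#", [0])
def pvRaiseWitnessOut_generate_brute_force_list : List String := []

def Spec_generate_brute_force_list (string : String) (int_list : List Int) (out : List String) : Prop := out = generate_brute_force_list_alt string int_list
instance (string : String) (int_list : List Int) (out : List String) : Decidable (Spec_generate_brute_force_list string int_list out) := by unfold Spec_generate_brute_force_list; infer_instance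

-- ===== CLAIM (what is proved, stated in full; the proofs are below) =====
def Claim_equal_generate_brute_force_list : Prop := ∀ (string : String) (int_list : List Int), Dom_generate_brute_force_list string int_list → Pre_generate_brute_force_list string int_list → Spec_generate_brute_force_list string int_list (generate_brute_force_list string int_list)

def Claim_raises_generate_brute_force_list : Prop := (∀ (string : String) (int_list : List Int), Dom_generate_brute_force_list string int_list → Raises_generate_brute_force_list string int_list → ¬ Pre_generate_brute_force_list string int_list) ∧ (Dom_generate_brute_force_list (pvRaiseWitness_generate_brute_force_list.1) (pvRaiseWitness_generate_brute_force_list.2) ∧ Raises_generate_brute_force_list (pvRaiseWitness_generate_brute_force_list.1) (pvRaiseWitness_generate_brute_force_list.2) ∧ generate_brute_force_list_alt (pvRaiseWitness_generate_brute_force_list.1) (pvRaiseWitness_generate_brute_force_list.2) = pvRaiseWitnessOut_generate_brute_force_list)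

-- ===== LEMMAS AND PROOFS =====

/-- '?' → '.', everything else unchanged (the effect of the final `.replace('?', '.')`). -/
def gbfRep (c : Char) : Char := if c = '?' then '.' else c

/-- The 0-based positions of the '?' characters. -/
def gbfQrel : List Char → List Int
  | [] => []
  | c :: rest => if c = '?' then 0 :: (gbfQrel rest).map (· + 1) else (gbfQrel rest).map (· + 1)

/-- A's per-combo string build, on the char-list level. -/
def gbfBuildA (cs : List Char) (combo : List Int) : List Char :=
  (combo.foldl (fun sl i => PySem.List.pySetD sl i '#') cs).map gbfRep

lemma gbfQrel_nonneg : ∀ (cs : List Char), ∀ i ∈ gbfQrel cs, 0 ≤ i := by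
  intro cs
  induction cs with
  | nil => simp [gbfQrel]
  | cons c rest ih =>
    intro i hi
    simp only [gbfQrel] at hi
    split at hi
    · simp only [List.mem_cons, List.mem_map] at hi
      rcases hi with rfl | ⟨j, hj, rfl⟩
      · omega
      · have := ih j hj; omega
    · simp only [List.mem_map] at hi
      obtain ⟨j, hj, rfl⟩ := hi
      have := ih j hj; omega

lemma gbfQidx : ∀ (cs : List Char) (s : Int),
    ((PySem.List.enumerate cs s).filter (fun p => p.2 == '?')).map (fun p => p.1)
      = (gbfQrel cs).map (· + s) := by
  intro cs
  induction cs with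
  | nil => intro s; simp [PySem.List.enumerate_nil, gbfQrel]
  | cons c rest ih =>
    intro s
    rw [PySem.List.enumerate_cons]
    by_cases hc : c = '?'
    · subst hc
      simp only [List.filter_cons, gbfQrel, beq_self_eq_true, if_true, List.map_cons,
        ih (s + 1), List.map_map]
      refine List.cons_eq_cons.mpr ⟨by omega, ?_⟩
      apply List.map_congr_left
      intro x _
      simp [Function.comp]
      omega
    · simp only [List.filter_cons, gbfQrel, if_neg hc]
      have : (((s, c).2 == '?') : Bool) = false := by simpa using hc
      simp only [this, Bool.false_eq_true, if_false, ih (s + 1), List.map_map]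
      apply List.map_congr_left
      intro x _
      simp [Function.comp]
      omega

lemma gbfFoldl_shift (combo : List Int) (h : ∀ e ∈ combo, 0 ≤ e) (c : Char) (rest : List Char) :
    (combo.map (· + 1)).foldl (fun sl i => PySem.List.pySetD sl i '#') (c :: rest)
      = c :: combo.foldl (fun sl i => PySem.List.pySetD sl i '#') rest := by
  induction combo generalizing rest with
  | nil => simp
  | cons e t ih =>
    have he : 0 ≤ e := h e (by simp)
    simp only [List.map_cons, List.foldl_cons]
    rw [PySem.List.pySetD_of_nonneg (c :: rest) '#' (by omega : (0:Int) ≤ e + 1),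
        PySem.List.pySetD_of_nonneg rest '#' he]
    have : (e + 1).toNat = e.toNat + 1 := by omega
    rw [this, List.set_cons_succ]
    exact ih (fun x hx => h x (by simp [hx])) _

lemma gbfBuildA_shift (combo : List Int) (h : ∀ e ∈ combo, 0 ≤ e) (c : Char) (rest : List Char) :
    gbfBuildA (c :: rest) (combo.map (· + 1)) = gbfRep c :: gbfBuildA rest combo := by
  unfold gbfBuildA
  rw [gbfFoldl_shift combo h c rest, List.map_cons]

lemma gbfBuildA_pick (combo : List Int) (h : ∀ e ∈ combo, 0 ≤ e) (rest : List Char) :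
    gbfBuildA ('?' :: rest) ((0 : Int) :: combo.map (· + 1)) = '#' :: gbfBuildA rest combo := by
  unfold gbfBuildA
  simp only [List.foldl_cons]
  rw [PySem.List.pySetD_of_nonneg ('?' :: rest) '#' (by omega : (0:Int) ≤ 0)]
  have : ((0 : Int)).toNat = 0 := rfl
  rw [this, List.set_cons_zero, gbfFoldl_shift combo h '#' rest, List.map_cons]
  simp [gbfRep]

lemma gbfCombo_nonneg (cs : List Char) (k : Nat) (combo : List Int)
    (h : combo ∈ PySem.List.combinations (gbfQrel cs) k) : ∀ e ∈ combo, 0 ≤ e := by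
  intro e he
  exact gbfQrel_nonneg cs e ((PySem.List.sublist_of_mem_combinations h).subset he)

lemma gbfMain : ∀ (cs : List Char) (k : Nat),
    gbfGo cs (k : Int) = (PySem.List.combinations (gbfQrel cs) k).map (gbfBuildA cs) := by
  intro cs
  induction cs with
  | nil =>
    intro k
    cases k with
    | zero => simp [gbfGo, PySem.List.combinations_zero, gbfBuildA]
    | succ r =>
      simp only [gbfGo]
      rw [if_neg (by push_cast; omega)]
      simp [gbfQrel, PySem.List.combinations_nil_succ]
  | cons c rest ih =>
    intro k
    by_cases hc : c = '?'
    · subst hc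
      cases k with
      | zero =>
        simp only [gbfGo, reduceIte, Nat.cast_zero]
        rw [if_neg (by omega : ¬ (0:Int) > 0)]
        have h0 := ih 0
        simp only [Nat.cast_zero] at h0
        rw [h0]
        simp only [PySem.List.combinations_zero, List.nil_append, List.map_cons,
          List.map_nil, gbfQrel, reduceIte]
        refine congrArg (· :: []) ?_
        show gbfRep '?' :: gbfBuildA rest [] = gbfBuildA ('?' :: rest) []
        rw [show ([] : List Int) = (([] : List Int).map (· + 1)) from rfl,
          gbfBuildA_shift [] (by simp) '?' rest]
        simp
      | succ r =>
        have hb : ((r + 1 : Nat) : Int) > 0 := by omega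
        have hsub : ((r + 1 : Nat) : Int) - 1 = (r : Int) := by omega
        simp only [gbfGo, reduceIte, if_pos hb, hsub]
        rw [ih r, ih (r + 1)]
        simp only [gbfQrel, reduceIte, PySem.List.combinations_cons_succ,
          PySem.List.combinations_map, List.map_append, List.map_map]
        refine congrArg₂ (· ++ ·) ?_ ?_
        · apply List.map_congr_left
          intro combo hcombo
          have hn := gbfCombo_nonneg rest r combo hcombo
          exact (gbfBuildA_pick combo hn rest).symm
        · apply List.map_congr_left
          intro combo hcombo
          have hn := gbfCombo_nonneg rest (r + 1) combo hcombo
          have := gbfBuildA_shift combo hn '?' rest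
          simp only [gbfRep, reduceIte] at this
          exact this.symm
    · simp only [gbfGo, if_neg hc]
      rw [ih k]
      simp only [gbfQrel, if_neg hc, PySem.List.combinations_map, List.map_map]
      apply List.map_congr_left
      intro combo hcombo
      have hn := gbfCombo_nonneg rest k combo hcombo
      have := gbfBuildA_shift combo hn c rest
      simp only [gbfRep, if_neg hc] at this
      exact this.symm

lemma gbfReplaceGo : ∀ (l : List Char) (fuel : Nat) (acc : List Char), l.length ≤ fuel →
    PySem.Chars.replace.go ['?'] ['.'] fuel l acc = acc.reverse ++ l.map gbfRep := by
  intro l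
  induction l with
  | nil =>
    intro fuel acc _
    cases fuel <;> simp [PySem.Chars.replace.go]
  | cons c t ih =>
    intro fuel acc hf
    cases fuel with
    | zero => simp at hf
    | succ f =>
      simp only [PySem.Chars.replace.go]
      by_cases hc : c = '?'
      · subst hc
        have hpre : List.isPrefixOf ['?'] ('?' :: t) = true := by
          simp [List.isPrefixOf]
        rw [if_pos hpre]
        have : List.drop (['?'] : List Char).length ('?' :: t) = t := by simp
        rw [this, ih f _ (by simpa using hf)]
        simp [gbfRep]
      · have hpre : List.isPrefixOf ['?'] (c :: t) = false := by
          simp [List.isPrefixOf]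
          exact fun h => absurd h.symm hc
        rw [if_neg (by simp [hpre])]
        rw [ih f _ (by simpa using hf)]
        simp [gbfRep, hc]

lemma gbfReplace (l : List Char) :
    PySem.Str.replace (String.ofList l) "?" "." = String.ofList (l.map gbfRep) := by
  have h : (PySem.Str.replace (String.ofList l) "?" ".").toList = l.map gbfRep := by
    rw [PySem.Str.toList_replace]
    have h1 : (String.ofList l).toList = l := Eq.symm (String.ofList_eq.mp rfl)
    rw [h1, show ("?" : String).toList = ['?'] from rfl,
      show ("." : String).toList = ['.'] from rfl]
    unfold PySem.Chars.replace
    rw [if_neg (by simp)]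
    exact gbfReplaceGo l l.length [] (le_refl _)
  apply String.toList_inj.mp
  rw [h]
  exact String.ofList_eq.mp rfl

-- ===== VERDICT (by name: the statement is the Claim_ definition above) =====
theorem generate_brute_force_list_spec : Claim_equal_generate_brute_force_list := by
  intro s l _ hpre
  unfold Spec_generate_brute_force_list generate_brute_force_list generate_brute_force_list_alt
  unfold Pre_generate_brute_force_list at hpre
  set k := l.sum - (PySem.Str.count s "#" : Int) with hk
  have hkk : (k.toNat : Int) = k := Int.toNat_of_nonneg hpre
  rw [PySem.List.foldl_append_singleton_eq_map, List.nil_append]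
  rw [gbfQidx s.toList 0]
  have hmapid : (gbfQrel s.toList).map (· + (0:Int)) = gbfQrel s.toList := by
    simp
  rw [hmapid]
  rw [← hkk, gbfMain s.toList k.toNat, List.map_map]
  apply List.map_congr_left
  intro combo _
  simp only [Function.comp_apply]
  rw [gbfReplace]
  unfold gbfBuildA
  rfl

theorem generate_brute_force_list_raises : Claim_raises_generate_brute_force_list := by
  unfold Claim_raises_generate_brute_force_list
  constructor
  · intro s l _ hr hp
    unfold Raises_generate_brute_force_list at hr
    unfold Pre_generate_brute_force_list at hp
    omega
  · exact ⟨by decide, by decide, by decide⟩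

-- self-check: the raises-witness value of B, read off the raises claim
theorem gbf_raise_witness_ok :
    generate_brute_force_list_alt (pvRaiseWitness_generate_brute_force_list.1)
      (pvRaiseWitness_generate_brute_force_list.2) = pvRaiseWitnessOut_generate_brute_force_list := by
  have h := generate_brute_force_list_raises
  unfold Claim_raises_generate_brute_force_list at h
  exact h.2.2.2
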